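-- pv_equiv track=rewrite | github.com/Ushapithani/python | leetcode/even_sum_count_product.py | analyze_even_digits
-- ===== SOURCE A (Python) =====
-- def analyze_even_digits(n):
--     even_digits = []
--     total = 0
--     product = 1
--     n = abs(n)
--     if n == 0:
--         even_digits.append(0)
--         total = 0
--         product = 0
--     while n > 0:
--         digit = n % 10
--         if digit % 2 == 0:
--             even_digits.append(digit)
--             total += digit
--             product *= digit
--         n //= 10
--     return even_digits[::-1], len(even_digits), total, product
-- ===== SOURCE B (Python) =====
-- def analyze_even_digits(n):
--     even_digits = []
--     total = 0
--     product = 1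
--     for ch in str(abs(n)):
--         d = int(ch)
--         if d % 2 == 0:
--             even_digits.append(d)
--             total += d
--             product *= d
--     return even_digits, len(even_digits), total, product
-- ===== Notes on version B (the rewrite author's own statement) =====
-- stated objective: simpler
-- what changed: B extracts digits from the decimal string of abs(n) most-significant-first instead of A's arithmetic mod/floordiv loop, so it needs no final list reversal and no special-case branch for n == 0.
import Mathlib
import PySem

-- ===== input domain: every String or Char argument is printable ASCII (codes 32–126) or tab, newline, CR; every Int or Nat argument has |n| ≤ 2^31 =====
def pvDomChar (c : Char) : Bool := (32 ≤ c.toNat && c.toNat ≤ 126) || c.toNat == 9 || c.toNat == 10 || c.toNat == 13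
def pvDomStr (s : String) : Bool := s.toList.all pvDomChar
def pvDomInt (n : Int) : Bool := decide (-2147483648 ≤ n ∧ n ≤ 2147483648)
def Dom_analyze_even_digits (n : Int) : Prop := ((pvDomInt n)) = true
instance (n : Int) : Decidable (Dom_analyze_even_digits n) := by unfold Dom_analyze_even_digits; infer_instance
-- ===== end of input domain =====

-- B iterates the decimal string of |n| most-significant-digit first, so it needs no final
-- reversal and no special case for n == 0; same return value, simpler structure (objective: simpler).

-- ===== PORT A =====
-- the 'while n > 0' loop of A, state = (even_digits so far, total, product)
def adLoopA (n : Int) (ed : List Int) (t p : Int) : List Int × Int × Int :=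
  if _h : 0 < n then
    let digit := PySem.Int.mod n 10
    if PySem.Int.mod digit 2 = 0 then
      adLoopA (PySem.Int.floordiv n 10) (ed ++ [digit]) (t + digit) (p * digit)
    else
      adLoopA (PySem.Int.floordiv n 10) ed t p
  else (ed, t, p)
termination_by n.toNat
decreasing_by
  all_goals
    rw [PySem.Int.floordiv_eq_ediv_of_pos (by norm_num : (0:Int) < 10)]
    omega

def analyze_even_digits (n : Int) : List Int × Int × Int × Int :=
  let m := |n|
  let init : List Int × Int × Int := if m = 0 then ([0], 0, 0) else ([], 0, 1)
  let r := adLoopA m init.1 init.2.1 init.2.2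
  ((PySem.List.slice? r.1 none none (-1)).getD [], (r.1.length : Int), r.2.1, r.2.2)

-- ===== PORT B =====
-- the body of B's 'for ch in str(abs(n))' loop
def bDigitStep (st : List Int × Int × Int) (ch : Char) : List Int × Int × Int :=
  let d := (PySem.Int.ofChars? [ch]).getD 0   -- int(ch); every ch of str(abs(n)) is a digit
  if PySem.Int.mod d 2 = 0 then (st.1 ++ [d], st.2.1 + d, st.2.2 * d) else st

def analyze_even_digits_alt (n : Int) : List Int × Int × Int × Int :=
  let r := (PySem.Int.toStr |n|).toList.foldl bDigitStep ([], 0, 1)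
  (r.1, (r.1.length : Int), r.2.1, r.2.2)

-- ===== PRECONDITION & SPEC =====
def Spec_analyze_even_digits (n : Int) (out : List Int × Int × Int × Int) : Prop := out = analyze_even_digits_alt n
instance (n : Int) (out : List Int × Int × Int × Int) : Decidable (Spec_analyze_even_digits n out) := by unfold Spec_analyze_even_digits; infer_instance

-- ===== CLAIM (what is proved, stated in full; the proofs are below) =====
def Claim_equal_analyze_even_digits : Prop := ∀ (n : Int), Dom_analyze_even_digits n → Spec_analyze_even_digits n (analyze_even_digits n)

-- ===== LEMMAS AND PROOFS =====

-- the common digit-processing step, on the Int value of a digit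
def dstep (st : List Int × Int × Int) (d : Int) : List Int × Int × Int :=
  if PySem.Int.mod d 2 = 0 then (st.1 ++ [d], st.2.1 + d, st.2.2 * d) else st

def evenF (d : Int) : Bool := decide (PySem.Int.mod d 2 = 0)

-- folding dstep over a digit list appends the even digits and accumulates their sum/product
theorem foldl_dstep_char (L : List Int) (ed : List Int) (t p : Int) :
    L.foldl dstep (ed, t, p) =
      (ed ++ L.filter evenF, t + (L.filter evenF).sum, p * (L.filter evenF).prod) := by
  induction L generalizing ed t p with
  | nil => simp
  | cons d L ih =>
    by_cases hd : PySem.Int.mod d 2 = 0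
    · have hd' : (2:Int) ∣ d := (PySem.Int.mod_eq_zero_iff_dvd d 2).mp hd
      rw [List.foldl_cons, dstep, if_pos hd, ih]
      simp [evenF, hd', add_assoc, mul_assoc]
    · have hd' : ¬ (2:Int) ∣ d := fun h => hd ((PySem.Int.mod_eq_zero_iff_dvd d 2).mpr h)
      rw [List.foldl_cons, dstep, if_neg hd, ih]
      simp [evenF, hd']

-- the Int digits of m, least significant first
def digitsI (m : Nat) : List Int := (Nat.digits 10 m).map (fun (d : Nat) => (d : Int))

-- A's while-loop is the fold of dstep over the digits, least significant first
theorem adLoopA_char (m : Nat) : ∀ (ed : List Int) (t p : Int),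
    adLoopA (m : Int) ed t p = (digitsI m).foldl dstep (ed, t, p) := by
  induction m using Nat.strong_induction_on with
  | _ m ih =>
    intro ed t p
    by_cases hm : m = 0
    · subst hm
      rw [adLoopA]
      simp [digitsI]
    · have hmpos : 0 < m := Nat.pos_of_ne_zero hm
      have h10 : (0:Int) < 10 := by norm_num
      have hpos : (0:Int) < (m : Int) := by exact_mod_cast hmpos
      have hmod : PySem.Int.mod (m : Int) 10 = ((m % 10 : Nat) : Int) := by
        rw [PySem.Int.mod_eq_emod_of_pos h10]; push_cast; rfl
      have hdiv : PySem.Int.floordiv (m : Int) 10 = ((m / 10 : Nat) : Int) := by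
        rw [PySem.Int.floordiv_eq_ediv_of_pos h10]; push_cast; rfl
      have hrec := ih (m / 10) (Nat.div_lt_self hmpos (by norm_num))
      have hdig : digitsI m = ((m % 10 : Nat) : Int) :: digitsI (m / 10) := by
        unfold digitsI
        rw [Nat.digits_def' (by norm_num : 1 < 10) hmpos, List.map_cons]
      rw [adLoopA, dif_pos hpos, hmod, hdiv, hdig, List.foldl_cons]
      by_cases he : PySem.Int.mod ((m % 10 : Nat) : Int) 2 = 0
      · rw [if_pos he, hrec]
        congr 1
        rw [dstep, if_pos he]
      · rw [if_neg he, hrec]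
        congr 1
        rw [dstep, if_neg he]

-- core's toDigits (most significant first) is the reverse of Mathlib's digits, as chars
theorem toDigits_char (m : Nat) (hm : m ≠ 0) :
    Nat.toDigits 10 m = ((Nat.digits 10 m).map Nat.digitChar).reverse := by
  induction m using Nat.strong_induction_on with
  | _ m ih =>
    have hmpos : 0 < m := Nat.pos_of_ne_zero hm
    rw [Nat.toDigits_eq_if (by norm_num : 1 < 10),
        Nat.digits_def' (by norm_num : 1 < 10) hmpos]
    by_cases hlt : m < 10
    · have hdiv0 : m / 10 = 0 := Nat.div_eq_of_lt hlt
      have hmod : m % 10 = m := Nat.mod_eq_of_lt hlt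
      simp [hlt, hdiv0, hmod]
    · have hdivne : m / 10 ≠ 0 := by
        intro h
        exact hlt (by omega : m < 10)
      rw [if_neg hlt, ih (m / 10) (Nat.div_lt_self hmpos (by norm_num)) hdivne]
      simp

-- int(ch) recovers the digit from its character
theorem ofChars_digitChar (d : Nat) (hd : d < 10) :
    (PySem.Int.ofChars? [Nat.digitChar d]).getD 0 = (d : Int) := by
  interval_cases d <;> decide

-- on digit characters, B's loop body is the common step on the digit's Int value
theorem bDigitStep_dstep (st : List Int × Int × Int) (d : Nat) (hd : d < 10) :
    bDigitStep st (Nat.digitChar d) = dstep st ((d : Nat) : Int) := by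
  rw [bDigitStep, dstep, ofChars_digitChar d hd]

-- both ports evaluated on a positive |n| = m
theorem main_pos (m : Nat) (hm : m ≠ 0) :
    analyze_even_digits ((m : Int)) = analyze_even_digits_alt ((m : Int)) := by
  have hnonneg : (0:Int) ≤ (m : Int) := by exact_mod_cast Nat.zero_le m
  have habs : |((m : Int))| = ((m : Int)) := abs_of_nonneg hnonneg
  have hne : ((m : Int)) ≠ 0 := by exact_mod_cast hm
  -- B's char list
  have hchars : (PySem.Int.toStr ((m : Int))).toList
      = ((Nat.digits 10 m).map Nat.digitChar).reverse := by
    rw [PySem.Int.toList_toStr]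
    have hnlt : ¬ ((m : Int) < 0) := not_lt.mpr hnonneg
    rw [PySem.Int.toChars, if_neg hnlt, Int.toNat_natCast]
    exact toDigits_char m hm
  have hrev : ((Nat.digits 10 m).reverse).map (fun (d : Nat) => (d : Int))
      = (digitsI m).reverse := by
    rw [digitsI, List.map_reverse]
  -- B's fold = fold of dstep over the reversed Int digits
  have hBfold : (PySem.Int.toStr ((m : Int))).toList.foldl bDigitStep ([], 0, 1)
      = ((digitsI m).reverse).foldl dstep ([], 0, 1) := by
    rw [hchars, ← List.map_reverse, List.foldl_map]
    rw [PySem.List.foldl_congr_mem ((Nat.digits 10 m).reverse)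
      (fun st d => bDigitStep st (Nat.digitChar d)) (fun st (d : Nat) => dstep st (d : Int))
      ([], 0, 1)
      (fun acc d hdmem =>
        bDigitStep_dstep acc d (Nat.digits_lt_base (by norm_num) (List.mem_reverse.mp hdmem)))]
    rw [← List.foldl_map, hrev]
  -- evaluate both sides
  rw [analyze_even_digits, analyze_even_digits_alt, habs]
  rw [if_neg hne, hBfold, adLoopA_char m]
  rw [foldl_dstep_char, foldl_dstep_char]
  rw [PySem.List.slice?_none_none_neg_one]
  rw [List.filter_reverse, List.sum_reverse, List.prod_reverse]
  simp

-- ===== VERDICT (by name: the statement is the Claim_ definition above) =====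
theorem analyze_even_digits_spec : Claim_equal_analyze_even_digits := by
  intro n _
  unfold Spec_analyze_even_digits
  have hn : |n| = ((n.natAbs : Nat) : Int) := Int.abs_eq_natAbs n
  have hA : analyze_even_digits n = analyze_even_digits ((n.natAbs : Int)) := by
    rw [analyze_even_digits, analyze_even_digits, hn, abs_of_nonneg (by positivity : (0:Int) ≤ (n.natAbs : Int))]
  have hB : analyze_even_digits_alt n = analyze_even_digits_alt ((n.natAbs : Int)) := by
    rw [analyze_even_digits_alt, analyze_even_digits_alt, hn, abs_of_nonneg (by positivity : (0:Int) ≤ (n.natAbs : Int))]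
  rw [hA, hB]
  by_cases hm : n.natAbs = 0
  · rw [hm, Nat.cast_zero]
    rw [analyze_even_digits, adLoopA]
    norm_num
    decide
  · exact main_pos n.natAbs hm
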